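-- pv_equiv track=rewrite | github.com/kevinveenbirkenbach/certbot-domain-bundler | main.py | group_domains
-- ===== SOURCE A (Python) =====
-- from collections import defaultdict
--
-- def group_domains(domains, domain_categories):
--     """Group domains either by specific categories or by their base domain (SLD.TLD)."""
--     grouped = defaultdict(list)
--     if domain_categories:
--         # Sort categories descending by length to match the most specific first
--         sorted_categories = sorted(domain_categories, key=lambda x: len(x), reverse=True)
--         for domain in domains:
--             matched = False
--             for category in sorted_categories:
--                 if domain.endswith(category):
--                     grouped[category].append(domain)
--                     matched = True
--                     break
--             if not matched:
--                 parts = domain.split('.')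
--                 if len(parts) >= 2:
--                     key = '.'.join(parts[-2:])
--                     grouped[key].append(domain)
--     else:
--         for domain in domains:
--             parts = domain.split('.')
--             if len(parts) >= 2:
--                 key = '.'.join(parts[-2:])
--                 grouped[key].append(domain)
--     return grouped
-- ===== SOURCE B (Python) =====
-- def group_domains(domains, domain_categories):
--     """Group domains either by specific categories or by their base domain (SLD.TLD)."""
--     grouped = {}
--     for domain in domains:
--         # single unsorted pass: keep the longest category that is a suffix of domain
--         best = None
--         for category in domain_categories:
--             if domain.endswith(category) and (best is None or len(category) > len(best)):
--                 best = category
--         if best is None: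
--             parts = domain.split('.')
--             if len(parts) < 2:
--                 continue
--             best = '.'.join(parts[-2:])
--         grouped.setdefault(best, []).append(domain)
--     return grouped
-- ===== Notes on version B (the rewrite author's own statement) =====
-- stated objective: alternative
-- what changed: B drops A's descending-length sort and first-match-with-break scan; for each domain it makes a single unsorted pass over the categories keeping the longest matching suffix, and uses one loop with a key function instead of A's two separate loops.
import Mathlib
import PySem

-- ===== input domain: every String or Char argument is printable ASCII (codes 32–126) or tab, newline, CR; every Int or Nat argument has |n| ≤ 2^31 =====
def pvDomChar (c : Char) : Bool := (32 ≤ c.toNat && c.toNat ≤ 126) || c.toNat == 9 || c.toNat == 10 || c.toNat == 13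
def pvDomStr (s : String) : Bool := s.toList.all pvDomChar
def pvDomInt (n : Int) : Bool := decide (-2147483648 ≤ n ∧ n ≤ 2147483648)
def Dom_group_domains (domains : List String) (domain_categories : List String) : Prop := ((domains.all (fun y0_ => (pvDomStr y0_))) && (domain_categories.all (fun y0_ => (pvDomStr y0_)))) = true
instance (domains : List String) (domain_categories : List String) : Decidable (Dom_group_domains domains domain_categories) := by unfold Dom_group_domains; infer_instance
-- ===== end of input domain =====

-- B replaces A's sort-by-length-descending + first-match-with-break by a single unsorted pass
-- per domain that keeps the longest category suffix (alternative decomposition, one loop).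

-- ===== PORT A =====

-- "'.'.join(domain.split('.')[-2:])" if the domain has >= 2 parts; the separator "." is a
-- non-empty literal, so split? is always `some` and the getD default is never used.
def baseKey (domain : String) : Option String :=
  let parts := (PySem.Str.split? domain ".").getD []
  if 2 ≤ parts.length then
    some (PySem.Str.join "." (PySem.List.slice parts (some (-2)) none))
  else none

-- the inner 'for category in sorted_categories: … break' loop with its `matched` flag:
-- first category in the list that `domain` ends with
def firstMatchA (domain : String) : List String → Option String
  | [] => none
  | c :: rest => if PySem.Str.endswith domain c then some c else firstMatchA domain rest

-- defaultdict(list): grouped[key].append(domain)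
def dappend (g : PySem.Dict String (List String)) (key : String) (domain : String) :
    PySem.Dict String (List String) :=
  g.insert key (g.getD key [] ++ [domain])

def group_domains (domains : List String) (domain_categories : List String) : List (String × List String) :=
  (if domain_categories ≠ [] then
    let sorted_categories := PySem.List.sorted domain_categories (fun x => PySem.Str.len x) true
    domains.foldl (fun g domain =>
      match firstMatchA domain sorted_categories with
      | some category => dappend g category domain
      | none =>
        match baseKey domain with
        | some key => dappend g key domain
        | none => g) PySem.Dict.empty
  else
    domains.foldl (fun g domain =>
      match baseKey domain with
      | some key => dappend g key domain
      | none => g) PySem.Dict.empty).items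

-- ===== PORT B =====

-- single unsorted pass: keep the longest category that is a suffix of domain;
-- bestStep is the body of the inner 'for category in domain_categories' loop
def bestStep (domain : String) (best : Option String) (category : String) : Option String :=
  if PySem.Str.endswith domain category &&
     (match best with
      | none => true
      | some b => PySem.Str.len b < PySem.Str.len category) then
    some category
  else best

def bestFold (domain : String) (cats : List String) : Option String :=
  cats.foldl (bestStep domain) none

def bestKey (domain_categories : List String) (domain : String) : Option String :=
  match bestFold domain domain_categories with
  | some best => some best
  | none =>
    let parts := (PySem.Str.split? domain ".").getD []
    if parts.length < 2 then none
    else some (PySem.Str.join "." (PySem.List.slice parts (some (-2)) none))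

def group_domains_alt (domains : List String) (domain_categories : List String) : List (String × List String) :=
  (domains.foldl (fun g domain =>
    match bestKey domain_categories domain with
    | some best => g.insert best (g.getD best [] ++ [domain])
    | none => g) PySem.Dict.empty).items

-- ===== PRECONDITION & SPEC =====
def Spec_group_domains (domains : List String) (domain_categories : List String) (out : List (String × List String)) : Prop := out = group_domains_alt domains domain_categories
instance (domains : List String) (domain_categories : List String) (out : List (String × List String)) : Decidable (Spec_group_domains domains domain_categories out) := by unfold Spec_group_domains; infer_instance

-- ===== CLAIM (what is proved, stated in full; the proofs are below) =====
def Claim_equal_group_domains : Prop := ∀ (domains : List String) (domain_categories : List String), Dom_group_domains domains domain_categories → Spec_group_domains domains domain_categories (group_domains domains domain_categories)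

-- ===== LEMMAS AND PROOFS =====

-- two suffixes of the same string with the same length are equal
theorem suffix_eq_of_len_eq {a b c : List Char} (h1 : a <:+ c) (h2 : b <:+ c)
    (h3 : a.length = b.length) : a = b := by
  obtain ⟨u, rfl⟩ := h1
  obtain ⟨v, hv⟩ := h2
  exact (List.append_inj_right hv
    (by have := congrArg List.length hv; simp at this ⊢; omega)).symm

theorem match_eq_of_len_eq {d a b : String} (ha : PySem.Str.endswith d a = true)
    (hb : PySem.Str.endswith d b = true) (h : PySem.Str.len a = PySem.Str.len b) : a = b := by
  rw [PySem.Str.endswith_eq, PySem.Chars.endswith_iff] at ha hb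
  have : a.toList = b.toList := by
    apply suffix_eq_of_len_eq ha hb
    rw [PySem.Str.len_eq, PySem.Str.len_eq] at h
    exact_mod_cast h
  exact String.toList_inj.mp this

-- characterisation of A's first-match scan
theorem firstMatchA_some {d : String} {l : List String} {c : String}
    (h : firstMatchA d l = some c) : c ∈ l ∧ PySem.Str.endswith d c = true := by
  induction l with
  | nil => simp [firstMatchA] at h
  | cons x t ih =>
    unfold firstMatchA at h
    by_cases hx : PySem.Str.endswith d x = true
    · rw [if_pos hx] at h
      cases h
      exact ⟨List.mem_cons_self, hx⟩
    · rw [if_neg hx] at h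
      obtain ⟨hm, he⟩ := ih h
      exact ⟨List.mem_cons_of_mem _ hm, he⟩

theorem firstMatchA_none {d : String} {l : List String}
    (h : firstMatchA d l = none) : ∀ c ∈ l, PySem.Str.endswith d c = false := by
  induction l with
  | nil => simp
  | cons x t ih =>
    unfold firstMatchA at h
    by_cases hx : PySem.Str.endswith d x = true
    · rw [if_pos hx] at h; cases h
    · rw [if_neg hx] at h
      intro c hc
      rcases List.mem_cons.1 hc with rfl | hc
      · simpa using hx
      · exact ih h c hc

-- on a length-descending list the first match is a longest match
theorem firstMatchA_longest {d : String} {l : List String} {c : String}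
    (hp : l.Pairwise (fun a b => PySem.Str.len b ≤ PySem.Str.len a))
    (h : firstMatchA d l = some c) :
    ∀ c' ∈ l, PySem.Str.endswith d c' = true → PySem.Str.len c' ≤ PySem.Str.len c := by
  induction l with
  | nil => simp [firstMatchA] at h
  | cons x t ih =>
    rcases List.pairwise_cons.1 hp with ⟨hx, ht⟩
    unfold firstMatchA at h
    by_cases he : PySem.Str.endswith d x = true
    · rw [if_pos he] at h; cases h
      intro c' hc' _
      rcases List.mem_cons.1 hc' with rfl | hc'
      · exact le_refl _
      · exact hx c' hc'
    · rw [if_neg he] at h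
      intro c' hc' hec'
      rcases List.mem_cons.1 hc' with rfl | hc'
      · exact absurd hec' he
      · exact ih ht h c' hc' hec'

-- one step of B's running-longest loop
theorem bestStep_cases (d : String) (b : Option String) (z : String) :
    bestStep d b z = b ∨ (bestStep d b z = some z ∧ PySem.Str.endswith d z = true) := by
  cases b <;> simp only [bestStep] <;> split
  all_goals first
    | exact Or.inl rfl
    | (rename_i h; rw [Bool.and_eq_true] at h; exact Or.inr ⟨rfl, h.1⟩)

theorem bestStep_mono (d : String) (b : Option String) (z x : String) (hx : b = some x) :
    ∃ w, bestStep d b z = some w ∧ PySem.Str.len x ≤ PySem.Str.len w := by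
  subst hx
  simp only [bestStep]
  split
  · rename_i h
    rw [Bool.and_eq_true] at h
    exact ⟨z, rfl, le_of_lt (by simpa using h.2)⟩
  · exact ⟨x, rfl, le_refl _⟩

theorem bestStep_hit (d : String) (b : Option String) (z : String)
    (hez : PySem.Str.endswith d z = true) :
    ∃ w, bestStep d b z = some w ∧ PySem.Str.len z ≤ PySem.Str.len w := by
  cases b with
  | none =>
    have hc : (PySem.Str.endswith d z &&
        (match (none : Option String) with
         | none => true
         | some b => PySem.Str.len b < PySem.Str.len z)) = true := by
      rw [Bool.and_eq_true]; exact ⟨hez, rfl⟩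
    exact ⟨z, by simp only [bestStep]; rw [if_pos hc], le_refl _⟩
  | some bb =>
    by_cases hlt : PySem.Str.len bb < PySem.Str.len z
    · have hc : (PySem.Str.endswith d z &&
          (match (some bb : Option String) with
           | none => true
           | some b => PySem.Str.len b < PySem.Str.len z)) = true := by
        rw [Bool.and_eq_true]; exact ⟨hez, by simpa using hlt⟩
      exact ⟨z, by simp only [bestStep]; rw [if_pos hc], le_refl _⟩
    · have hc : ¬((PySem.Str.endswith d z &&
          (match (some bb : Option String) with
           | none => true
           | some b => PySem.Str.len b < PySem.Str.len z)) = true) := by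
        rw [Bool.and_eq_true]
        rintro ⟨-, h2⟩
        exact hlt (by simpa using h2)
      exact ⟨bb, by simp only [bestStep]; rw [if_neg hc], le_of_not_gt hlt⟩

-- invariant of B's running-longest fold
theorem bestFold_go (d : String) (l : List String) (b : Option String) :
    let r := l.foldl (bestStep d) b
    (∀ x, r = some x → b = some x ∨ (x ∈ l ∧ PySem.Str.endswith d x = true)) ∧
    (r = none → b = none) ∧
    (∀ c ∈ l, PySem.Str.endswith d c = true →
      ∃ x, r = some x ∧ PySem.Str.len c ≤ PySem.Str.len x) ∧
    (∀ x, b = some x → ∃ y, r = some y ∧ PySem.Str.len x ≤ PySem.Str.len y) := by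
  induction l generalizing b with
  | nil =>
    exact ⟨fun x h => Or.inl h, fun h => h, by simp, fun x h => ⟨x, h, le_refl _⟩⟩
  | cons z t ih =>
    intro r
    have hstep : r = t.foldl (bestStep d) (bestStep d b z) := rfl
    obtain ⟨ih1, ih2, ih3, ih4⟩ := ih (bestStep d b z)
    rw [← hstep] at ih1 ih2 ih3 ih4
    refine ⟨?_, ?_, ?_, ?_⟩
    · intro x hr
      rcases ih1 x hr with h1 | ⟨hm, he⟩
      · rcases bestStep_cases d b z with hbb | ⟨hbz, hez⟩
        · exact Or.inl (by rw [← hbb]; exact h1)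
        · rw [hbz] at h1
          have hxz : z = x := Option.some.inj h1
          subst hxz
          exact Or.inr ⟨List.mem_cons_self, hez⟩
      · exact Or.inr ⟨List.mem_cons_of_mem _ hm, he⟩
    · intro hr
      have h2 := ih2 hr
      rcases bestStep_cases d b z with hbb | ⟨hbz, _⟩
      · rw [← hbb]; exact h2
      · rw [hbz] at h2; exact absurd h2 (by simp)
    · intro c hc hec
      rcases List.mem_cons.1 hc with hceq | hct
      · subst hceq
        obtain ⟨w, hw, hlw⟩ := bestStep_hit d b c hec
        obtain ⟨y, hy, hly⟩ := ih4 w hw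
        exact ⟨y, hy, le_trans hlw hly⟩
      · exact ih3 c hct hec
    · intro x hx
      obtain ⟨w, hw, hlw⟩ := bestStep_mono d b z x hx
      obtain ⟨y, hy, hly⟩ := ih4 w hw
      exact ⟨y, hy, le_trans hlw hly⟩

-- the two per-domain matchers agree
theorem key_agree (d : String) (cats : List String) :
    firstMatchA d (PySem.List.sorted cats (fun x => PySem.Str.len x) true) = bestFold d cats := by
  set S := PySem.List.sorted cats (fun x => PySem.Str.len x) true with hS
  have hperm : S.Perm cats := PySem.List.sorted_perm cats _ true
  have hpair : S.Pairwise (fun a b => PySem.Str.len b ≤ PySem.Str.len a) :=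
    PySem.List.sorted_pairwise_rev cats _
  unfold bestFold
  obtain ⟨spec1, spec2, spec3, _⟩ := bestFold_go d cats none
  rcases hF : firstMatchA d S with _ | c
  · -- no category matches
    have hnone := firstMatchA_none hF
    rcases hB : cats.foldl (bestStep d) none with _ | x
    · rfl
    · obtain h1 := spec1 x hB
      rcases h1 with h1 | ⟨hm, he⟩
      · simp at h1
      · have := hnone x (hperm.mem_iff.2 hm)
        rw [he] at this; simp at this
  · obtain ⟨hcS, hce⟩ := firstMatchA_some hF
    have hlongest := firstMatchA_longest hpair hF
    obtain ⟨x, hx, hlen⟩ := spec3 c (hperm.mem_iff.1 hcS) hce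
    rcases spec1 x hx with h1 | ⟨hm, he⟩
    · simp at h1
    · have hle : PySem.Str.len x ≤ PySem.Str.len c :=
        hlongest x (hperm.mem_iff.2 hm) he
      have : x = c := match_eq_of_len_eq he hce (le_antisymm hle hlen)
      rw [hx, this]

-- the full per-domain step of A equals B's step
theorem step_agree (cats : List String) (d : String) (g : PySem.Dict String (List String)) :
    (match firstMatchA d (PySem.List.sorted cats (fun x => PySem.Str.len x) true) with
     | some category => dappend g category d
     | none =>
       match baseKey d with
       | some key => dappend g key d
       | none => g)
    = (match bestKey cats d with
       | some best => g.insert best (g.getD best [] ++ [d])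
       | none => g) := by
  rw [key_agree]
  unfold bestKey
  cases hfb : bestFold d cats with
  | some c => rfl
  | none =>
    unfold baseKey
    by_cases hlen : 2 ≤ ((PySem.Str.split? d ".").getD []).length
    · rw [if_pos hlen, if_neg (by omega)]
      rfl
    · rw [if_neg hlen, if_pos (by omega)]

-- ===== VERDICT (by name: the statement is the Claim_ definition above) =====
theorem group_domains_spec : Claim_equal_group_domains := by
  intro domains cats _
  unfold Spec_group_domains group_domains group_domains_alt
  by_cases hc : cats ≠ []
  · rw [if_pos hc]
    congr 1
    apply PySem.List.foldl_congr_mem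
    intro g dmn _
    exact step_agree cats dmn g
  · rw [if_neg hc]
    rw [not_ne_iff] at hc
    subst hc
    congr 1
    apply PySem.List.foldl_congr_mem
    intro g dmn _
    exact step_agree [] dmn g
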